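-- pv_equiv track=rewrite | github.com/zh-plus/Code_Library_Python | CodeJam/2018H/A_Big_Buttons.py | solve
-- ===== SOURCE A (Python) =====
-- def solve(T, forbidden_seqs):
--     # remove the useless forbidden sequences: O(n)
--     forbidden_seqs.sort(key=lambda x: len(x))
--     valid_forb_seqs = []
--     for seq in forbidden_seqs:
--         for valid_seq in valid_forb_seqs.copy():
--             if seq.startswith(valid_seq):
--                 break
--         else:
--             valid_forb_seqs.append(seq)
--
--     # compute the reductions
--     reduction = map(lambda f_seq: 2 ** (T - len(f_seq)), valid_forb_seqs)
--
--     return 2 ** T - sum(reduction)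
-- ===== SOURCE B (Python) =====
-- def solve(T, forbidden_seqs):
--     # Equivalence is about the return value: A sorts forbidden_seqs in place, B does not mutate it.
--     present = set(forbidden_seqs)
--     seen = set()
--     total = 0
--     for s in forbidden_seqs:
--         if s not in seen:
--             seen.add(s)
--             if all(s[:k] not in present for k in range(len(s))):
--                 total += 2 ** (T - len(s))
--     return 2 ** T - total
-- ===== Notes on version B (the rewrite author's own statement) =====
-- stated objective: alternative
-- what changed: B replaces A's sort + rescan of the growing kept-list by a single pass that tests each distinct string's proper prefixes against a hash set of all inputs (return value only: A additionally sorts the input list in place, B does not mutate it).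
-- outside the precondition, e.g. on solve(0, ['a']): A returns 0.5, B returns 0.5
import Mathlib
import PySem

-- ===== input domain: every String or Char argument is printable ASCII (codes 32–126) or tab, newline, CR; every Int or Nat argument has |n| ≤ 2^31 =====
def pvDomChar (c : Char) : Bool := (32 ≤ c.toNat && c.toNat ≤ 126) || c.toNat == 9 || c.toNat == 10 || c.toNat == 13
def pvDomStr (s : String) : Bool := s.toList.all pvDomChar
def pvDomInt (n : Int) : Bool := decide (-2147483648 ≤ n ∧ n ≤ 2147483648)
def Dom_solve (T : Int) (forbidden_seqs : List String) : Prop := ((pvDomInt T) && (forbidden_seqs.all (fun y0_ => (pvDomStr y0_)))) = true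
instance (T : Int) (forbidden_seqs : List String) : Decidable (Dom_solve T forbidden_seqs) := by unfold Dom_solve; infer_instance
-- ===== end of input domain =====

-- B: one pass over the input testing each distinct string's proper prefixes against a set of all
-- inputs, instead of A's sort + rescan of the growing kept-list (return value only: A sorts the
-- input list in place, B does not mutate it).


-- ===== PORT A =====
def solve (T : Int) (forbidden_seqs : List String) : Int :=
  let sortedSeqs := PySem.List.sorted forbidden_seqs (fun x => PySem.Str.len x)
  let valid_forb_seqs := sortedSeqs.foldl
    (fun valid seq =>
      if valid.any (fun v => PySem.Str.startswith seq v) then valid else valid ++ [seq]) []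
  (2:Int) ^ T.toNat -
    (valid_forb_seqs.map (fun f_seq => (2:Int) ^ (T - PySem.Str.len f_seq).toNat)).sum

-- ===== PORT B =====
def solve_alt (T : Int) (forbidden_seqs : List String) : Int :=
  let present : PySem.Set String := PySem.Set.ofList forbidden_seqs
  let st := forbidden_seqs.foldl
    (fun (st : PySem.Set String × Int) s =>
      if PySem.Set.contains st.1 s then st
      else if (PySem.List.pyRange 0 (PySem.Str.len s)).all
          (fun k => !(PySem.Set.contains present (PySem.Str.slice s none (some k)))) then
        (PySem.Set.add st.1 s, st.2 + (2:Int) ^ (T - PySem.Str.len s).toNat)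
      else (PySem.Set.add st.1 s, st.2))
    (PySem.Set.empty, 0)
  (2:Int) ^ T.toNat - st.2

-- ===== PRECONDITION & SPEC =====
-- Pre_ excludes T < 0 and inputs where some kept forbidden sequence (one with no proper prefix in
-- the list) is longer than T: there Python's 2 ** (T - len) is a float, so A's result is not an int.
def Pre_solve (T : Int) (forbidden_seqs : List String) : Prop :=
  0 ≤ T ∧ ∀ s ∈ forbidden_seqs,
    (∃ t ∈ forbidden_seqs, t ≠ s ∧ t.toList <+: s.toList) ∨ (s.toList.length : Int) ≤ T
instance (T : Int) (forbidden_seqs : List String) : Decidable (Pre_solve T forbidden_seqs) := by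
  unfold Pre_solve; infer_instance
def pvWitness_solve : Int × List String := (2, ["a", "ab"])

def Spec_solve (T : Int) (forbidden_seqs : List String) (out : Int) : Prop := out = solve_alt T forbidden_seqs
instance (T : Int) (forbidden_seqs : List String) (out : Int) : Decidable (Spec_solve T forbidden_seqs out) := by unfold Spec_solve; infer_instance

-- ===== CLAIM (what is proved, stated in full; the proofs are below) =====
def Claim_equal_solve : Prop := ∀ (T : Int) (forbidden_seqs : List String), Dom_solve T forbidden_seqs → Pre_solve T forbidden_seqs → Spec_solve T forbidden_seqs (solve T forbidden_seqs)

-- ===== LEMMAS AND PROOFS =====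

-- "s is minimal in L": no other element of L is a (proper) prefix of s.
def Pmin (L : List String) (s : String) : Prop :=
  ∀ t ∈ L, t ≠ s → ¬ (t.toList <+: s.toList)

def pminB (L : List String) (s : String) : Bool :=
  L.all (fun t => t == s || !(t.toList.isPrefixOf s.toList))

theorem pminB_iff (L : List String) (s : String) : pminB L s = true ↔ Pmin L s := by
  unfold pminB Pmin
  simp only [List.all_eq_true, Bool.or_eq_true, beq_iff_eq, Bool.not_eq_eq_eq_not, Bool.not_true,
    ← List.isPrefixOf_iff_prefix]
  simp only [Bool.not_eq_true]
  constructor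
  · intro h t ht hne
    rcases h t ht with h' | h'
    · exact absurd h' hne
    · exact h'
  · intro h t ht
    by_cases he : t = s
    · exact Or.inl he
    · exact Or.inr (by simp [h t ht he])

theorem startswith_iff' (s v : String) :
    PySem.Str.startswith s v = true ↔ v.toList <+: s.toList := by
  rw [PySem.Str.startswith_eq]
  exact PySem.Chars.startswith_iff _ _

theorem toList_inj {s t : String} (h : s.toList = t.toList) : s = t :=
  String.toList_injective h

theorem prefix_ne_length_lt {t s : String} (h : t.toList <+: s.toList) (hne : t ≠ s) :
    t.toList.length < s.toList.length := by
  rcases Nat.lt_or_ge t.toList.length s.toList.length with h1 | h1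
  · exact h1
  · exact absurd (toList_inj (List.IsPrefix.eq_of_length_le h h1)) hne

theorem exists_min (L : List String) :
    ∀ n (s : String), s.toList.length ≤ n → s ∈ L →
      ∃ m ∈ L, Pmin L m ∧ m.toList <+: s.toList := by
  intro n
  induction n with
  | zero =>
    intro s hlen hs
    refine ⟨s, hs, ?_, List.prefix_refl _⟩
    intro t ht hne hpref
    have := prefix_ne_length_lt hpref hne
    omega
  | succ n ih =>
    intro s hlen hs
    by_cases hp : Pmin L s
    · exact ⟨s, hs, hp, List.prefix_refl _⟩
    · unfold Pmin at hp
      push Not at hp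
      obtain ⟨t, ht, hne, hpref⟩ := hp
      have hlt := prefix_ne_length_lt hpref hne
      obtain ⟨m, hm, hmp, hmpref⟩ := ih t (by omega) ht
      exact ⟨m, hm, hmp, hmpref.trans hpref⟩

theorem foldA (L : List String) :
    ∀ (rest done acc : List String),
      (∀ t ∈ L, t ∈ done ∨ t ∈ rest) →
      rest.Pairwise (fun a b => a.toList.length ≤ b.toList.length) →
      (∀ x ∈ done, x ∈ L) → (∀ x ∈ rest, x ∈ L) →
      acc.Nodup → (∀ x, x ∈ acc ↔ x ∈ done ∧ Pmin L x) →
      (rest.foldl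
        (fun valid seq =>
          if valid.any (fun v => PySem.Str.startswith seq v) then valid else valid ++ [seq])
        acc).Nodup ∧
      ∀ x, x ∈ rest.foldl
        (fun valid seq =>
          if valid.any (fun v => PySem.Str.startswith seq v) then valid else valid ++ [seq])
        acc ↔ x ∈ L ∧ Pmin L x := by
  intro rest
  induction rest with
  | nil =>
    intro done acc hcover _ hdone _ hnodup hmem
    simp only [List.foldl_nil]
    refine ⟨hnodup, fun x => ?_⟩
    constructor
    · intro hx
      rcases (hmem x).1 hx with ⟨hxd, hxp⟩
      exact ⟨hdone x hxd, hxp⟩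
    · rintro ⟨hxL, hxp⟩
      rcases hcover x hxL with hxd | hxr
      · exact (hmem x).2 ⟨hxd, hxp⟩
      · simp at hxr
  | cons s rest' ih =>
    intro done acc hcover hpair hdone hrest hnodup hmem
    rw [List.pairwise_cons] at hpair
    obtain ⟨hpairhead, hpairtail⟩ := hpair
    have hsL : s ∈ L := hrest s (by simp)
    simp only [List.foldl_cons]
    by_cases hkeep : Pmin L s ∧ s ∉ done
    · obtain ⟨hpmin, hsnd⟩ := hkeep
      have hany : (acc.any (fun v => PySem.Str.startswith s v)) = false := by
        rw [List.any_eq_false]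
        intro v hv
        rw [Bool.not_eq_true, ← Bool.not_eq_true, startswith_iff']
        rcases (hmem v).1 hv with ⟨hvd, hvp⟩
        intro hpref
        by_cases hvs : v = s
        · exact hsnd (hvs ▸ hvd)
        · exact hpmin v (hdone v hvd) hvs hpref
      rw [hany]
      rw [if_neg Bool.false_ne_true]
      apply ih (done ++ [s]) (acc ++ [s])
      · intro t htL
        rcases hcover t htL with h | h
        · exact Or.inl (by simp [h])
        · rcases List.mem_cons.1 h with h | h
          · exact Or.inl (by simp [h])
          · exact Or.inr h
      · exact hpairtail
      · intro x hx
        rcases List.mem_append.1 hx with h | h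
        · exact hdone x h
        · simp at h; exact h ▸ hsL
      · intro x hx; exact hrest x (List.mem_cons_of_mem _ hx)
      · refine List.Nodup.append hnodup (List.nodup_singleton s) ?_
        intro a ha hb
        rw [List.mem_singleton] at hb
        exact hsnd (hb ▸ ((hmem a).1 ha).1)
      · intro x
        simp only [List.mem_append, List.mem_singleton]
        constructor
        · rintro (hx | rfl)
          · rcases (hmem x).1 hx with ⟨hxd, hxp⟩
            exact ⟨Or.inl hxd, hxp⟩
          · exact ⟨Or.inr rfl, hpmin⟩
        · rintro ⟨hxd | rfl, hxp⟩
          · exact Or.inl ((hmem x).2 ⟨hxd, hxp⟩)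
          · exact Or.inr rfl
    · have hany : (acc.any (fun v => PySem.Str.startswith s v)) = true := by
        rw [List.any_eq_true]
        by_cases hp : Pmin L s
        · have hsd : s ∈ done := by
            by_cases h : s ∈ done
            · exact h
            · exact absurd ⟨hp, h⟩ hkeep
          exact ⟨s, (hmem s).2 ⟨hsd, hp⟩, (startswith_iff' s s).2 (List.prefix_refl _)⟩
        · unfold Pmin at hp
          push Not at hp
          obtain ⟨t, htL, htne, htpref⟩ := hp
          obtain ⟨m, hmL, hmp, hmpref⟩ :=
            exists_min L t.toList.length t le_rfl htL
          have hmlen : m.toList.length < s.toList.length :=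
            lt_of_le_of_lt hmpref.length_le (prefix_ne_length_lt htpref htne)
          have hmd : m ∈ done := by
            rcases hcover m hmL with h | h
            · exact h
            · rcases List.mem_cons.1 h with h | h
              · subst h; omega
              · exact absurd (hpairhead m h) (by omega)
          exact ⟨m, (hmem m).2 ⟨hmd, hmp⟩,
            (startswith_iff' s m).2 (hmpref.trans htpref)⟩
      rw [hany]
      rw [if_pos rfl]
      apply ih (done ++ [s]) acc
      · intro t htL
        rcases hcover t htL with h | h
        · exact Or.inl (by simp [h])
        · rcases List.mem_cons.1 h with h | h
          · exact Or.inl (by simp [h])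
          · exact Or.inr h
      · exact hpairtail
      · intro x hx
        rcases List.mem_append.1 hx with h | h
        · exact hdone x h
        · simp at h; exact h ▸ hsL
      · intro x hx; exact hrest x (List.mem_cons_of_mem _ hx)
      · exact hnodup
      · intro x
        simp only [List.mem_append, List.mem_singleton]
        constructor
        · intro hx
          rcases (hmem x).1 hx with ⟨hxd, hxp⟩
          exact ⟨Or.inl hxd, hxp⟩
        · rintro ⟨hxd | rfl, hxp⟩
          · exact (hmem x).2 ⟨hxd, hxp⟩
          · have hsd : x ∈ done := by
              by_cases h : x ∈ done
              · exact h
              · exact absurd ⟨hxp, h⟩ hkeep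
            exact (hmem x).2 ⟨hsd, hxp⟩

theorem innercheck (L : List String) (s : String) :
    ((PySem.List.pyRange 0 (PySem.Str.len s)).all
      (fun k => !(PySem.Set.contains (PySem.Set.ofList L) (PySem.Str.slice s none (some k))))) = true
      ↔ Pmin L s := by
  rw [List.all_eq_true]
  constructor
  · intro h t ht hne hpref
    have hlt := prefix_ne_length_lt hpref hne
    have hk : (t.toList.length : Int) ∈ PySem.List.pyRange 0 (PySem.Str.len s) := by
      rw [PySem.List.mem_pyRange_one, PySem.Str.len_eq]
      constructor
      · exact Int.natCast_nonneg _
      · exact_mod_cast hlt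
    have h2 := h _ hk
    rw [Bool.not_eq_true'] at h2
    have heq : (PySem.Str.slice s none (some (t.toList.length : Int))) = t := by
      apply toList_inj
      rw [PySem.Str.toList_slice, PySem.Chars.slice_eq_listSlice,
        PySem.List.slice_to _ (Int.natCast_nonneg _), Int.toNat_natCast]
      exact (List.prefix_iff_eq_take.mp hpref).symm
    rw [heq] at h2
    have := (PySem.Set.contains_iff (PySem.Set.ofList L) t).2 ((PySem.Set.mem_ofList L t).2 ht)
    rw [this] at h2
    simp at h2
  · intro h k hk
    rw [PySem.List.mem_pyRange_one] at hk
    obtain ⟨hk0, hklt⟩ := hk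
    rw [PySem.Str.len_eq] at hklt
    rw [Bool.not_eq_true']
    by_cases hmem : (PySem.Str.slice s none (some k)) ∈ L
    · exfalso
      set u := PySem.Str.slice s none (some k) with hudef
      have hul : u.toList = s.toList.take k.toNat := by
        rw [hudef, PySem.Str.toList_slice, PySem.Chars.slice_eq_listSlice,
          PySem.List.slice_to _ hk0]
      have hlen : u.toList.length = k.toNat := by
        rw [hul, List.length_take]
        omega
      have hne : u ≠ s := by
        intro he
        rw [he] at hlen
        omega
      exact h u hmem hne (hul ▸ List.take_prefix _ _)
    · rw [← Bool.not_eq_true, PySem.Set.contains_iff, PySem.Set.mem_ofList]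
      exact hmem

theorem foldB (L : List String) (T : Int) :
    ∀ (rest done : List String) (seen : PySem.Set String) (total : Int),
      (∀ x, x ∈ seen ↔ x ∈ done) →
      total = (done.toFinset.filter (fun x => pminB L x)).sum
        (fun s => (2:Int) ^ (T - PySem.Str.len s).toNat) →
      (rest.foldl
        (fun (st : PySem.Set String × Int) s =>
          if PySem.Set.contains st.1 s then st
          else if (PySem.List.pyRange 0 (PySem.Str.len s)).all
              (fun k => !(PySem.Set.contains (PySem.Set.ofList L) (PySem.Str.slice s none (some k)))) then
            (PySem.Set.add st.1 s, st.2 + (2:Int) ^ (T - PySem.Str.len s).toNat)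
          else (PySem.Set.add st.1 s, st.2))
        (seen, total)).2
      = (((done ++ rest).toFinset.filter (fun x => pminB L x)).sum
        (fun s => (2:Int) ^ (T - PySem.Str.len s).toNat)) := by
  intro rest
  induction rest with
  | nil =>
    intro done seen total hseen htotal
    simpa using htotal
  | cons t rest' ih =>
    intro done seen total hseen htotal
    simp only [List.foldl_cons]
    rw [List.append_cons]
    by_cases hc : PySem.Set.contains seen t = true
    · rw [if_pos hc]
      have htd : t ∈ done := (hseen t).1 ((PySem.Set.contains_iff seen t).1 hc)
      have hfs : (done ++ [t]).toFinset = done.toFinset := by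
        ext x
        simp only [List.mem_toFinset, List.mem_append, List.mem_singleton]
        constructor
        · rintro (h | rfl)
          · exact h
          · exact htd
        · exact Or.inl
      apply ih (done ++ [t]) seen total
      · intro x
        rw [hseen x]
        simp only [List.mem_append, List.mem_singleton]
        exact ⟨Or.inl, by rintro (h | rfl); exacts [h, htd]⟩
      · rw [htotal, hfs]
    · rw [if_neg hc]
      have htd : t ∉ done := fun h => hc ((PySem.Set.contains_iff seen t).2 ((hseen t).2 h))
      have hfins : (done ++ [t]).toFinset = insert t done.toFinset := by
        ext x
        simp only [List.mem_toFinset, List.mem_append, List.mem_singleton,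
          Finset.mem_insert, List.mem_toFinset]
        exact or_comm
      have hseen' : ∀ x, x ∈ PySem.Set.add seen t ↔ x ∈ done ++ [t] := by
        intro x
        rw [PySem.Set.mem_add]
        simp only [List.mem_append, List.mem_singleton]
        rw [hseen x]
      have htnf : t ∉ done.toFinset.filter (fun x => pminB L x) := by
        intro h
        exact htd (List.mem_toFinset.1 (Finset.mem_filter.1 h).1)
      by_cases hall : ((PySem.List.pyRange 0 (PySem.Str.len t)).all
          (fun k => !(PySem.Set.contains (PySem.Set.ofList L) (PySem.Str.slice t none (some k))))) = true
      · rw [if_pos hall]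
        apply ih (done ++ [t]) _ _ hseen'
        rw [htotal, hfins, Finset.filter_insert,
          if_pos ((pminB_iff L t).2 ((innercheck L t).1 hall)),
          Finset.sum_insert htnf]
        ring
      · rw [if_neg hall]
        apply ih (done ++ [t]) _ _ hseen'
        rw [htotal, hfins, Finset.filter_insert,
          if_neg (fun hp => hall ((innercheck L t).2 ((pminB_iff L t).1 hp)))]

-- ===== VERDICT (by name: the statement is the Claim_ definition above) =====
theorem solve_spec : Claim_equal_solve := by
  intro T l _ _
  unfold Spec_solve solve solve_alt
  dsimp only
  congr 1
  have hp : (PySem.List.sorted l (fun x => PySem.Str.len x)).Pairwise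
      (fun a b => a.toList.length ≤ b.toList.length) :=
    (PySem.List.sorted_pairwise l (fun x => PySem.Str.len x)).imp (by
      intro a b h
      rw [PySem.Str.len_eq, PySem.Str.len_eq] at h
      exact_mod_cast h)
  obtain ⟨hnd, hmem⟩ := foldA l (PySem.List.sorted l (fun x => PySem.Str.len x)) [] []
    (fun t ht => Or.inr ((PySem.List.mem_sorted l _ false t).2 ht))
    hp
    (fun x hx => absurd hx (by simp))
    (fun x hx => (PySem.List.mem_sorted l _ false x).1 hx)
    List.nodup_nil
    (by intro x; simp)
  have hA : ((List.foldl
      (fun valid seq =>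
        if valid.any (fun v => PySem.Str.startswith seq v) then valid else valid ++ [seq])
      [] (PySem.List.sorted l (fun x => PySem.Str.len x))).map
        (fun f_seq => (2:Int) ^ (T - PySem.Str.len f_seq).toNat)).sum
      = (l.toFinset.filter (fun x => pminB l x)).sum
        (fun s => (2:Int) ^ (T - PySem.Str.len s).toNat) := by
    rw [← List.sum_toFinset _ hnd]
    apply Finset.sum_congr
    · ext x
      simp only [List.mem_toFinset, Finset.mem_filter, pminB_iff]
      exact hmem x
    · intro x _
      rfl
  have hB := foldB l T l [] PySem.Set.empty 0
    (by intro x; constructor <;> (intro h; simp [PySem.Set.empty] at h))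
    (by simp)
  simp only [List.nil_append] at hB
  rw [hA, hB]
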